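-- pv_equiv track=rewrite | github.com/ggpp0909/problem_solving | Python/SWEA/0813/p2/p2.py | itoa
-- ===== SOURCE A (Python) =====
-- def itoa(num):
--     ans = ''
--     is_neg = ''
--     if num < 0:
--         is_neg = '-'
--
--     num = abs(num)
--     while num > 0:
--         temp = num % 10
--         ans += chr(48 + temp)
--         num //= 10
--     ans += is_neg  # 음수일때만 '-'
--
--     return ans[::-1]  # 앞에서부터 쌓았으므로 거꾸로 리턴
-- ===== SOURCE B (Python) =====
-- def itoa(num):
--     sign = '-' if num < 0 else ''
--     n = abs(num)
--     div = 1
--     while div * 10 <= n: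
--         div *= 10
--     ans = []
--     while div > 0:
--         ans.append(chr(48 + (n // div) % 10))
--         n %= div
--         div //= 10
--     return sign + ''.join(ans)
-- ===== Notes on version B (the rewrite author's own statement) =====
-- stated objective: alternative
-- what changed: B finds the largest power of ten <= |num| first and emits digits most-significant-first, instead of A's least-significant-first accumulation followed by a string reversal.
-- intended difference: On num = 0 A returns '' (its digit loop never runs), while B naturally returns '0', the intended decimal representation of zero. — e.g. on itoa(0): A returns "", B returns "0"
import Mathlib
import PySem

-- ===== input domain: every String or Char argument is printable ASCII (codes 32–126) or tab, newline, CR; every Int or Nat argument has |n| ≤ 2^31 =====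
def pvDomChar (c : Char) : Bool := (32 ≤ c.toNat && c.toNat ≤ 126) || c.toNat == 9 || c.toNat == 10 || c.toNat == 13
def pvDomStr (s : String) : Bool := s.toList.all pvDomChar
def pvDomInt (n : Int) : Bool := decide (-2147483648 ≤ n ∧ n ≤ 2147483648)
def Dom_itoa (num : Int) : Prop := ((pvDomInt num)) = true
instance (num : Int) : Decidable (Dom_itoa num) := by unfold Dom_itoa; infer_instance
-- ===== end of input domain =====

-- B emits digits most-significant-first after a magnitude pass (no reversal); it differs from A only at num = 0 (see D_itoa).

-- ===== PORT A =====
-- A's while loop: append chr(48 + num % 10) least-significant-first; itoa then adds the sign and reverses.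
def itoaDigitsA (n : Nat) : List Char :=
  if n = 0 then []
  else Char.ofNat (48 + n % 10) :: itoaDigitsA (n / 10)
decreasing_by exact Nat.div_lt_self (Nat.pos_of_ne_zero (by assumption)) (by norm_num)

def itoa (num : Int) : String :=
  let isNeg : List Char := if num < 0 then ['-'] else []
  String.ofList ((itoaDigitsA num.natAbs ++ isNeg).reverse)

-- ===== PORT B =====
-- B's first while loop: div = 1; while div * 10 <= n: div *= 10.
-- (the '0 < d' conjunct only makes the recursion total; B's loop always has d ≥ 1)
def itoaFindDiv (n d : Nat) : Nat :=
  if 0 < d ∧ d * 10 ≤ n then itoaFindDiv n (d * 10) else d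
termination_by n - d
decreasing_by omega

-- B's second while loop: while div > 0: emit chr(48 + (n // div) % 10); n %= div; div //= 10.
def itoaMsb (n d : Nat) : List Char :=
  if h : 0 < d then Char.ofNat (48 + (n / d) % 10) :: itoaMsb (n % d) (d / 10) else []
termination_by d
decreasing_by exact Nat.div_lt_self h (by norm_num)

def itoa_alt (num : Int) : String :=
  let sign : String := if num < 0 then "-" else ""
  sign ++ String.ofList (itoaMsb num.natAbs (itoaFindDiv num.natAbs 1))

-- ===== PRECONDITION & SPEC =====
-- On num = 0, A returns "" (its digit loop never runs) while B returns "0", the intended decimal form of zero.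
def D_itoa (num : Int) : Prop := num = 0
instance (num : Int) : Decidable (D_itoa num) := by unfold D_itoa; infer_instance
def Spec_itoa (num : Int) (out : String) : Prop := ¬ D_itoa num → out = itoa_alt num
instance (num : Int) (out : String) : Decidable (Spec_itoa num out) := by unfold Spec_itoa; infer_instance
def pvDiffWitness_itoa : Int := 0
def pvDiffWitnessOut_itoa : String × String := ("", "0")

-- ===== CLAIM (what is proved, stated in full; the proofs are below) =====
def Claim_unchanged_itoa : Prop := ∀ (num : Int), Dom_itoa num → Spec_itoa num (itoa num)
def Claim_changed_itoa : Prop := Dom_itoa (pvDiffWitness_itoa) ∧ D_itoa (pvDiffWitness_itoa) ∧ itoa (pvDiffWitness_itoa) = pvDiffWitnessOut_itoa.1 ∧ itoa_alt (pvDiffWitness_itoa) = pvDiffWitnessOut_itoa.2 ∧ pvDiffWitnessOut_itoa.1 ≠ pvDiffWitnessOut_itoa.2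
def Claim_exact_itoa : Prop := ∀ (num : Int), Dom_itoa num → D_itoa num → itoa num ≠ itoa_alt num

-- ===== LEMMAS AND PROOFS =====

theorem itoaMsb_zero (n : Nat) : itoaMsb n 0 = [] := by
  rw [itoaMsb]; simp

theorem itoaMsb_pos (n d : Nat) (h : 0 < d) :
    itoaMsb n d = Char.ofNat (48 + (n / d) % 10) :: itoaMsb (n % d) (d / 10) := by
  rw [itoaMsb]; simp [h]

theorem itoaMsb_one (n : Nat) : itoaMsb n 1 = [Char.ofNat (48 + n % 10)] := by
  rw [itoaMsb_pos n 1 (by norm_num)]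
  norm_num [itoaMsb_zero]

-- msb extraction with one more power of ten peels the LAST digit off the back
theorem itoaMsb_pow_succ (k : Nat) : ∀ n : Nat,
    itoaMsb n (10 ^ (k + 1)) = itoaMsb (n / 10) (10 ^ k) ++ [Char.ofNat (48 + n % 10)] := by
  induction k with
  | zero =>
    intro n
    rw [pow_one, pow_zero, itoaMsb_pos n 10 (by norm_num)]
    norm_num [itoaMsb_one, Nat.mod_mod_of_dvd n (dvd_refl 10)]
  | succ k ih =>
    intro n
    have hp : 0 < (10:Nat) ^ (k + 1 + 1) := pow_pos (by norm_num) _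
    have hp1 : 0 < (10:Nat) ^ (k + 1) := pow_pos (by norm_num) _
    rw [itoaMsb_pos n _ hp, itoaMsb_pos (n / 10) _ hp1]
    have e1 : (10:Nat) ^ (k + 1 + 1) / 10 = 10 ^ (k + 1) := by
      rw [pow_succ]; exact Nat.mul_div_cancel _ (by norm_num)
    have e2 : (10:Nat) ^ (k + 1) / 10 = 10 ^ k := by
      rw [pow_succ]; exact Nat.mul_div_cancel _ (by norm_num)
    rw [e1, e2, ih (n % 10 ^ (k + 1 + 1))]
    have a1 : n % 10 ^ (k + 1 + 1) / 10 = n / 10 % 10 ^ (k + 1) := by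
      rw [pow_succ' 10 (k + 1)]
      exact Nat.mod_mul_right_div_self n 10 (10 ^ (k + 1))
    have a2 : n % 10 ^ (k + 1 + 1) % 10 = n % 10 :=
      Nat.mod_mod_of_dvd n (dvd_pow_self 10 (by omega))
    have a3 : n / 10 ^ (k + 1 + 1) = n / 10 / 10 ^ (k + 1) := by
      rw [Nat.div_div_eq_div_mul, pow_succ' 10 (k + 1)]
    rw [a1, a2, a3]
    simp

-- core: for n with 10^k ≤ n < 10^(k+1), A's reversed digit list is B's msb extraction at 10^k
theorem rev_digits_eq_msb (k : Nat) : ∀ n : Nat, 10 ^ k ≤ n → n < 10 ^ (k + 1) →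
    (itoaDigitsA n).reverse = itoaMsb n (10 ^ k) := by
  induction k with
  | zero =>
    intro n h1 h2
    rw [pow_zero] at *
    rw [pow_one] at h2
    have h0 : n / 10 = 0 := Nat.div_eq_of_lt h2
    rw [itoaDigitsA, if_neg (by omega : ¬ n = 0), h0, itoaDigitsA]
    simp [itoaMsb_one]
  | succ k ih =>
    intro n h1 h2
    have hpk : 0 < (10:Nat) ^ (k + 1) := pow_pos (by norm_num) _
    have hn : ¬ n = 0 := by omega
    have hd1 : 10 ^ k ≤ n / 10 := (Nat.le_div_iff_mul_le (by norm_num)).2 (by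
      rw [← pow_succ]; exact h1)
    have hd2 : n / 10 < 10 ^ (k + 1) := Nat.div_lt_of_lt_mul (by
      rw [← pow_succ']; exact h2)
    rw [itoaDigitsA, if_neg hn]
    simp only [List.reverse_cons]
    rw [ih (n / 10) hd1 hd2, itoaMsb_pow_succ]

-- B's first loop returns the largest power of ten ≤ n (times the starting d)
theorem itoaFindDiv_spec : ∀ (fuel n d : Nat), n - d ≤ fuel → 0 < d → d ≤ n →
    ∃ k, itoaFindDiv n d = d * 10 ^ k ∧ d * 10 ^ k ≤ n ∧ n < d * 10 ^ (k + 1) := by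
  intro fuel
  induction fuel with
  | zero =>
    intro n d hf hd hdn
    rw [itoaFindDiv, if_neg (by omega)]
    exact ⟨0, by ring, by simpa using hdn, by simp [pow_one]; omega⟩
  | succ fuel ih =>
    intro n d hf hd hdn
    rw [itoaFindDiv]
    by_cases hc : d * 10 ≤ n
    · rw [if_pos ⟨hd, hc⟩]
      obtain ⟨k, e, l, u⟩ := ih n (d * 10) (by omega) (by omega) hc
      refine ⟨k + 1, ?_, ?_, ?_⟩
      · rw [e]; ring
      · calc d * 10 ^ (k + 1) = d * 10 * 10 ^ k := by ring
          _ ≤ n := l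
      · calc n < d * 10 * 10 ^ (k + 1) := u
          _ = d * 10 ^ (k + 1 + 1) := by ring
    · rw [if_neg (by tauto)]
      exact ⟨0, by ring, by simpa using hdn, by simp [pow_one]; omega⟩

theorem itoa_core (n : Nat) (hn : 0 < n) :
    (itoaDigitsA n).reverse = itoaMsb n (itoaFindDiv n 1) := by
  obtain ⟨k, h1, h2, h3⟩ := itoaFindDiv_spec n n 1 (by omega) (by omega) hn
  simp only [Nat.one_mul] at h1 h2 h3
  rw [h1]
  exact rev_digits_eq_msb k n h2 h3

-- ===== VERDICT (by name: the statement is the Claim_ definition above) =====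
theorem itoa_spec : Claim_unchanged_itoa := by
  intro num _ hD
  unfold D_itoa at hD
  have hn : 0 < num.natAbs := by omega
  unfold itoa itoa_alt
  simp only [List.reverse_append]
  rw [← itoa_core num.natAbs hn]
  by_cases h : num < 0
  · simp [h]
    rw [← List.singleton_append, String.ofList_append]
  · simp [h]

theorem itoa_changed : Claim_changed_itoa := by
  unfold Claim_changed_itoa pvDiffWitness_itoa pvDiffWitnessOut_itoa
  refine ⟨by decide, by decide, ?_, ?_, by decide⟩
  · unfold itoa
    rw [itoaDigitsA]
    simp
  · unfold itoa_alt
    have : itoaFindDiv 0 1 = 1 := by rw [itoaFindDiv]; simp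
    simp [this, itoaMsb_one]

theorem itoa_tight : Claim_exact_itoa := by
  intro num _ h
  unfold D_itoa at h
  subst h
  have ha : itoa 0 = "" := by
    unfold itoa; rw [itoaDigitsA]; simp
  have hb : itoa_alt 0 = "0" := by
    unfold itoa_alt
    have : itoaFindDiv 0 1 = 1 := by rw [itoaFindDiv]; simp
    simp [this, itoaMsb_one]
  rw [ha, hb]
  simp
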